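-- pv_equiv track=rewrite | github.com/nao1234g/vps-automation-openclaw | scripts/build_runtime_execution_packet.py | _extract_between_headers
-- ===== SOURCE A (Python) =====
-- def _extract_between_headers(content: str, start_keyword: str, stop_keywords: list) -> list:
--     """start_keyword を含む行から stop_keywords のいずれかを含む行の直前まで返す"""
--     lines = content.split("\n")
--     capturing = False
--     result = []
--     for line in lines:
--         if start_keyword in line:
--             capturing = True
--         elif capturing and any(kw in line for kw in stop_keywords) and line.startswith("##"):
--             break
--         if capturing:
--             result.append(line)
--     return result
-- ===== SOURCE B (Python) =====
-- def _extract_between_headers(content: str, start_keyword: str, stop_keywords: list) -> list: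
--     """Find-start / find-end / slice decomposition of the stateful capturing loop."""
--     lines = content.split("\n")
--     start = _find_start(lines, start_keyword)
--     if start is None:
--         return []
--     end = _find_end(lines, start + 1, start_keyword, stop_keywords)
--     return lines[start:end]
--
--
-- def _find_start(lines, kw):
--     for i, line in enumerate(lines):
--         if kw in line:
--             return i
--     return None
--
--
-- def _find_end(lines, j, start_keyword, stop_keywords):
--     for k in range(j, len(lines)):
--         line = lines[k]
--         if start_keyword not in line and any(kw in line for kw in stop_keywords) and line.startswith("##"):
--             return k
--     return len(lines)
-- ===== Notes on version B (the rewrite author's own statement) =====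
-- stated objective: simpler
-- what changed: Replaced the single stateful capturing-flag loop (mutable flag + accumulator + break) with a find-start-index / find-end-index / slice decomposition.
import Mathlib
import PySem

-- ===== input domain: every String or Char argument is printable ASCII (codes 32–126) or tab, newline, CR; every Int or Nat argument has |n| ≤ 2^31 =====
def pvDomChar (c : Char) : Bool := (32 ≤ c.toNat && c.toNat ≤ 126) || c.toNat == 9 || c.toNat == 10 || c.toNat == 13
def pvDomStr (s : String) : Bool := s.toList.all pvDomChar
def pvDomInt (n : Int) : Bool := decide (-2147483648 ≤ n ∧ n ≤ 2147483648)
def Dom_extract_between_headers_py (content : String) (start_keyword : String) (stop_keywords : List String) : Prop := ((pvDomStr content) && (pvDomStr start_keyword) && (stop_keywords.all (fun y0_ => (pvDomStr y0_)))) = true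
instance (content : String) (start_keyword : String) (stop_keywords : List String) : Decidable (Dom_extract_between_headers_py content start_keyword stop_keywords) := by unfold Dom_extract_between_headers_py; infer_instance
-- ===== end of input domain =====

-- B replaces A's single stateful capturing-flag loop with a find-start / find-end / slice decomposition (objective: simpler).


-- ===== PORT A =====
-- the for-loop with the `capturing` flag, accumulator `result` and `break`
def pvLoopA (sk : String) (stops : List String) : List String → Bool → List String → List String
  | [], _, result => result
  | line :: rest, capturing, result =>
    if PySem.Str.isIn sk line then
      pvLoopA sk stops rest true (result ++ [line])
    else if capturing && (stops.any (fun kw => PySem.Str.isIn kw line)) && PySem.Str.startswith line "##" then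
      result
    else if capturing then
      pvLoopA sk stops rest capturing (result ++ [line])
    else
      pvLoopA sk stops rest capturing result

def extract_between_headers_py (content : String) (start_keyword : String) (stop_keywords : List String) : List String :=
  pvLoopA start_keyword stop_keywords ((PySem.Str.split? content "\n").getD []) false []

-- ===== PORT B =====
-- _find_start: first index whose line contains kw
def pvFindStart (kw : String) : List String → Nat → Option Nat
  | [], _ => none
  | line :: rest, i => if PySem.Str.isIn kw line then some i else pvFindStart kw rest (i + 1)

-- _find_end: first index ≥ j whose line is a stop header; len(lines) if none
def pvFindEnd (sk : String) (stops : List String) : List String → Nat → Nat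
  | [], k => k
  | line :: rest, k =>
    if !(PySem.Str.isIn sk line) && (stops.any (fun kw => PySem.Str.isIn kw line)) && PySem.Str.startswith line "##" then
      k
    else
      pvFindEnd sk stops rest (k + 1)

def extract_between_headers_py_alt (content : String) (start_keyword : String) (stop_keywords : List String) : List String :=
  let lines := (PySem.Str.split? content "\n").getD []
  match pvFindStart start_keyword lines 0 with
  | none => []
  | some start =>
    let e : Nat := pvFindEnd start_keyword stop_keywords (lines.drop (start + 1)) (start + 1)
    PySem.List.slice lines (some (start : Int)) (some (e : Int))

-- ===== PRECONDITION & SPEC =====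
def Spec_extract_between_headers_py (content : String) (start_keyword : String) (stop_keywords : List String) (out : List String) : Prop := out = extract_between_headers_py_alt content start_keyword stop_keywords
instance (content : String) (start_keyword : String) (stop_keywords : List String) (out : List String) : Decidable (Spec_extract_between_headers_py content start_keyword stop_keywords out) := by unfold Spec_extract_between_headers_py; infer_instance

-- ===== CLAIM (what is proved, stated in full; the proofs are below) =====
def Claim_equal_extract_between_headers_py : Prop := ∀ (content : String) (start_keyword : String) (stop_keywords : List String), Dom_extract_between_headers_py content start_keyword stop_keywords → Spec_extract_between_headers_py content start_keyword stop_keywords (extract_between_headers_py content start_keyword stop_keywords)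

-- ===== LEMMAS AND PROOFS =====

-- the stop condition both loops test
def pvStop (sk : String) (stops : List String) (line : String) : Bool :=
  !(PySem.Str.isIn sk line) && (stops.any (fun kw => PySem.Str.isIn kw line)) && PySem.Str.startswith line "##"

lemma pvFindEnd_eq (sk : String) (stops : List String) (l : List String) :
    ∀ k, pvFindEnd sk stops l k = k + (l.takeWhile (fun line => !pvStop sk stops line)).length := by
  induction l with
  | nil => intro k; simp [pvFindEnd]
  | cons line rest ih =>
    intro k
    by_cases hin : PySem.Chars.isIn sk.toList line.toList = true <;>
      by_cases hany : (stops.any fun kw => PySem.Chars.isIn kw.toList line.toList) = true <;>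
      by_cases hsw : PySem.Chars.startswith line.toList ['#', '#'] = true <;>
      simp [pvFindEnd, pvStop, hin, hany, hsw, ih] <;> omega

lemma pvLoopA_capturing (sk : String) (stops : List String) (l : List String) :
    ∀ acc, pvLoopA sk stops l true acc = acc ++ l.takeWhile (fun line => !pvStop sk stops line) := by
  induction l with
  | nil => intro acc; simp [pvLoopA]
  | cons line rest ih =>
    intro acc
    by_cases hin : PySem.Chars.isIn sk.toList line.toList = true <;>
      by_cases hany : (stops.any fun kw => PySem.Chars.isIn kw.toList line.toList) = true <;>
      by_cases hsw : PySem.Chars.startswith line.toList ['#', '#'] = true <;>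
      simp [pvLoopA, pvStop, hin, hany, hsw, ih]

lemma pvFindStart_shift (kw : String) (l : List String) :
    ∀ i, pvFindStart kw l i = (pvFindStart kw l 0).map (fun s => i + s) := by
  induction l with
  | nil => intro i; simp [pvFindStart]
  | cons line rest ih =>
    intro i
    by_cases h : PySem.Chars.isIn kw.toList line.toList = true
    · simp [pvFindStart, h]
    · simp only [pvFindStart, PySem.Str.isIn_eq, if_neg h]
      rw [ih (i + 1), ih 1, Option.map_map]
      congr 1; funext s; simp; omega

lemma take_takeWhile_length {α : Type} (p : α → Bool) (l : List α) :
    l.take (l.takeWhile p).length = l.takeWhile p := by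
  induction l with
  | nil => simp
  | cons x xs ih =>
    by_cases h : p x
    · simp [h, ih]
    · simp [h]

-- B's core on an arbitrary line list
def pvAltCore (sk : String) (stops : List String) (lines : List String) : List String :=
  match pvFindStart sk lines 0 with
  | none => []
  | some start =>
    let e : Nat := pvFindEnd sk stops (lines.drop (start + 1)) (start + 1)
    PySem.List.slice lines (some (start : Int)) (some (e : Int))

lemma pvMain (sk : String) (stops : List String) (lines : List String) :
    pvLoopA sk stops lines false [] = pvAltCore sk stops lines := by
  induction lines with
  | nil => simp [pvLoopA, pvAltCore, pvFindStart]
  | cons line rest ih =>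
    by_cases h1 : PySem.Chars.isIn sk.toList line.toList = true
    · -- start found at index 0
      simp only [pvAltCore, pvFindStart, PySem.Str.isIn_eq, if_pos h1]
      rw [show pvLoopA sk stops (line :: rest) false [] = pvLoopA sk stops rest true [line] by
            simp [pvLoopA, h1]]
      rw [pvLoopA_capturing]
      simp only [List.drop_succ_cons, List.drop_zero]
      rw [pvFindEnd_eq sk stops rest 1, PySem.List.slice_natCast]
      have hc : 1 + (List.takeWhile (fun line => !pvStop sk stops line) rest).length - 0
          = (List.takeWhile (fun line => !pvStop sk stops line) rest).length + 1 := by omega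
      simp only [List.drop_zero, hc, List.take_succ_cons, take_takeWhile_length]
      simp
    · -- not yet capturing: skip the line
      have hA : pvLoopA sk stops (line :: rest) false [] = pvLoopA sk stops rest false [] := by
        simp [pvLoopA, h1]
      rw [hA, ih]
      simp only [pvAltCore, pvFindStart, PySem.Str.isIn_eq, if_neg h1]
      rw [pvFindStart_shift sk rest 1]
      cases hfs : pvFindStart sk rest 0 with
      | none => simp
      | some s =>
        simp only [Option.map_some]
        have hdrop : (line :: rest).drop (1 + s + 1) = rest.drop (s + 1) := by
          simp [show 1 + s + 1 = (s + 1) + 1 by omega, List.drop_succ_cons]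
        rw [pvFindEnd_eq sk stops (rest.drop (s + 1)) (s + 1),
            pvFindEnd_eq sk stops ((line :: rest).drop (1 + s + 1)) (1 + s + 1),
            hdrop, PySem.List.slice_natCast, PySem.List.slice_natCast]
        have h1s : (line :: rest).drop (1 + s) = rest.drop s := by
          simp [show 1 + s = s + 1 by omega, List.drop_succ_cons]
        rw [h1s]
        congr 1
        omega

-- ===== VERDICT (by name: the statement is the Claim_ definition above) =====
theorem extract_between_headers_py_spec : Claim_equal_extract_between_headers_py := by
  intro content sk stops _
  unfold Spec_extract_between_headers_py extract_between_headers_py extract_between_headers_py_alt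
  exact pvMain sk stops ((PySem.Str.split? content "\n").getD [])
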